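-- pv_equiv track=rewrite | github.com/TheDaniel418/IsopGem | document_manager/services/concordance_service.py | _calculate_paragraph_positions
-- ===== SOURCE A (Python) =====
-- from typing import Dict, List, Optional, Set, Tuple
--
-- def _calculate_paragraph_positions(text: str) -> List[int]:
--     """Calculate the starting positions of each paragraph.
--
--     Args:
--         text: Text to analyze
--
--     Returns:
--         List of paragraph start positions
--     """
--     positions = [0]
--     lines = text.split('\n')
--     current_pos = 0
--
--     for i, line in enumerate(lines):
--         if i > 0 and line.strip() == '' and i < len(lines) - 1:
--             # Empty line indicates paragraph break
--             next_line_pos = current_pos + len(line) + 1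
--             if next_line_pos < len(text):
--                 positions.append(next_line_pos)
--         current_pos += len(line) + 1
--
--     return positions
-- ===== SOURCE B (Python) =====
-- from typing import Dict, List, Optional, Set, Tuple
--
-- def _calculate_paragraph_positions(text: str) -> List[int]:
--     """Calculate the starting positions of each paragraph."""
--     newlines = [i for i, c in enumerate(text) if c == '\n']
--     positions = [0]
--     for a, b in zip(newlines, newlines[1:]):
--         # the line between two consecutive newlines is text[a+1:b]
--         if text[a + 1:b].strip() == '' and b + 1 < len(text):
--             positions.append(b + 1)
--     return positions
-- ===== Notes on version B (the rewrite author's own statement) =====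
-- stated objective: alternative
-- what changed: B never splits the text into lines or keeps a running position accumulator: it collects the newline indices in one comprehension over the raw text and then walks consecutive newline pairs, slicing the line between each pair to test for blankness.
import Mathlib
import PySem

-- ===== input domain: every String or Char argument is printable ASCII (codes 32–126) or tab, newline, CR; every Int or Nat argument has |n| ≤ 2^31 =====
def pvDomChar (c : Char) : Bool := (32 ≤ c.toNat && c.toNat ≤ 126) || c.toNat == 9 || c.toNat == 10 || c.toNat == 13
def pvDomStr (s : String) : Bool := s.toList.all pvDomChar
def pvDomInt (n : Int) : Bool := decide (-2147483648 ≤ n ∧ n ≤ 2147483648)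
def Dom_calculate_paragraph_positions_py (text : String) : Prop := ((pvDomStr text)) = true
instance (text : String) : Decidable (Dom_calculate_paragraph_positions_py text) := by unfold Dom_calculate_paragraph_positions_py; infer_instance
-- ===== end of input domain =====

-- B scans the raw text for newline indices and walks consecutive newline pairs (slicing the line
-- between them) instead of splitting into lines and keeping a running position accumulator
-- (objective: alternative, same asymptotic cost).

-- ===== PORT A =====
def calculate_paragraph_positions_py (text : String) : List Int :=
  let cs := text.toList
  let lines := PySem.Chars.splitOn cs ['\n']          -- text.split('\n'), non-empty separator: exact
  let r := (PySem.List.enumerate lines 0).foldl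
    (fun (st : List Int × Int) (p : Int × List Char) =>
      (if 0 < p.1 ∧ PySem.Chars.strip p.2 = [] ∧ p.1 < (lines.length : Int) - 1 then
         (if st.2 + (p.2.length : Int) + 1 < (cs.length : Int) then
            st.1 ++ [st.2 + (p.2.length : Int) + 1]
          else st.1)
       else st.1,
       st.2 + (p.2.length : Int) + 1))
    ([0], 0)
  r.1

-- ===== PORT B =====
def calculate_paragraph_positions_py_alt (text : String) : List Int :=
  let cs := text.toList
  let nl : List Int :=
    ((PySem.List.enumerate cs 0).filter (fun p => p.2 == '\n')).map (fun p => p.1)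
  (nl.zip nl.tail).foldl
    (fun positions ab =>
      if PySem.Chars.strip (PySem.Chars.slice cs (some (ab.1 + 1)) (some ab.2)) = [] ∧
         ab.2 + 1 < (cs.length : Int) then
        positions ++ [ab.2 + 1]
      else positions)
    [0]

-- ===== PRECONDITION & SPEC =====
def Spec_calculate_paragraph_positions_py (text : String) (out : List Int) : Prop := out = calculate_paragraph_positions_py_alt text
instance (text : String) (out : List Int) : Decidable (Spec_calculate_paragraph_positions_py text out) := by unfold Spec_calculate_paragraph_positions_py; infer_instance

-- ===== CLAIM (what is proved, stated in full; the proofs are below) =====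
def Claim_equal_calculate_paragraph_positions_py : Prop := ∀ (text : String), Dom_calculate_paragraph_positions_py text → Spec_calculate_paragraph_positions_py text (calculate_paragraph_positions_py text)

-- ===== LEMMAS AND PROOFS =====

def splitNl : List Char → List (List Char)
  | [] => [[]]
  | c :: cs => if c = '\n' then [] :: splitNl cs else (splitNl cs).modifyHead (c :: ·)

lemma splitNl_ne_nil (cs : List Char) : splitNl cs ≠ [] := by
  induction cs with
  | nil => simp [splitNl]
  | cons c cs ih =>
    simp only [splitNl]
    split
    · simp
    · cases h : splitNl cs with
      | nil => exact absurd h ih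
      | cons a t => simp

lemma splitOn_go_nl :
    ∀ (fuel : Nat) (l cur : List Char) (acc : List (List Char)), l.length < fuel →
      PySem.Chars.splitOn.go ['\n'] fuel l cur acc
        = acc.reverse ++ (splitNl l).modifyHead (cur.reverse ++ ·) := by
  intro fuel
  induction fuel with
  | zero => intro l cur acc h; omega
  | succ fuel ih =>
    intro l cur acc h
    cases l with
    | nil => simp [PySem.Chars.splitOn.go, splitNl]
    | cons c rest =>
      simp only [PySem.Chars.splitOn.go]
      by_cases hc : c = '\n'
      · subst hc
        rw [if_pos (by simp [List.isPrefixOf])]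
        rw [ih _ _ _ (by simp at h ⊢; omega)]
        simp only [splitNl, if_pos rfl, List.modifyHead_cons, List.reverse_cons,
          List.reverse_nil, List.nil_append, List.append_assoc, List.cons_append,
          List.nil_append, List.modifyHead]
        cases hs : splitNl rest <;> simp [hs]
      · rw [if_neg (by simp [List.isPrefixOf]; exact Ne.symm hc)]
        rw [ih _ _ _ (by simp at h ⊢; omega)]
        simp only [splitNl, if_neg hc]
        rw [List.modifyHead_modifyHead]
        cases hs : splitNl rest <;> simp

lemma splitOn_eq_splitNl (cs : List Char) :
    PySem.Chars.splitOn cs ['\n'] = splitNl cs := by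
  unfold PySem.Chars.splitOn
  rw [splitOn_go_nl (cs.length + 1) cs [] [] (by omega)]
  cases h : splitNl cs with
  | nil => exact absurd h (splitNl_ne_nil cs)
  | cons a t => simp

def joinNl : List (List Char) → List Char
  | [] => []
  | [l] => l
  | l :: l' :: ls => l ++ '\n' :: joinNl (l' :: ls)

def freeNl (l : List Char) : Prop := '\n' ∉ l

lemma joinNl_splitNl (cs : List Char) : joinNl (splitNl cs) = cs := by
  induction cs with
  | nil => simp [splitNl, joinNl]
  | cons c cs ih =>
    simp only [splitNl]
    by_cases hc : c = '\n'
    · subst hc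
      rw [if_pos rfl]
      cases hs : splitNl cs with
      | nil => exact absurd hs (splitNl_ne_nil cs)
      | cons a t => rw [hs] at ih; simp [joinNl, ih]
    · rw [if_neg hc]
      cases hs : splitNl cs with
      | nil => exact absurd hs (splitNl_ne_nil cs)
      | cons a t =>
        rw [hs] at ih
        cases t with
        | nil => simpa [joinNl] using ih
        | cons b t' => simpa [joinNl] using ih

lemma freeNl_splitNl (cs : List Char) : ∀ l ∈ splitNl cs, freeNl l := by
  induction cs with
  | nil => simp [splitNl, freeNl]
  | cons c cs ih =>
    simp only [splitNl]
    by_cases hc : c = '\n'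
    · subst hc
      rw [if_pos rfl]
      intro l hl
      rcases hl with _ | hl
      · simp [freeNl]
      · exact ih _ (by assumption)
    · rw [if_neg hc]
      cases hs : splitNl cs with
      | nil => exact absurd hs (splitNl_ne_nil cs)
      | cons a t =>
        intro l hl
        rcases hl with _ | hl
        · have := ih a (by rw [hs]; exact List.mem_cons_self ..)
          simp only [freeNl] at this ⊢
          simp [this, Ne.symm hc]
        · exact ih _ (by rw [hs]; exact List.mem_cons_of_mem _ (by assumption))

def picksA (n L : Int) : List (List Char) → Int → Int → List Int
  | [], _, _ => []
  | l :: ls, i, cp =>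
    (if 0 < i ∧ PySem.Chars.strip l = [] ∧ i < n - 1 ∧ cp + (l.length : Int) + 1 < L
     then [cp + (l.length : Int) + 1] else []) ++ picksA n L ls (i + 1) (cp + (l.length : Int) + 1)

def picksA' (L : Int) : List (List Char) → Int → List Int
  | [], _ => []
  | [_], _ => []
  | l :: l' :: r, cp =>
    (if PySem.Chars.strip l = [] ∧ cp + (l.length : Int) + 1 < L
     then [cp + (l.length : Int) + 1] else []) ++ picksA' L (l' :: r) (cp + (l.length : Int) + 1)

def nlOf : List Char → Int → List Int
  | [], _ => []
  | c :: cs, s => if c = '\n' then s :: nlOf cs (s + 1) else nlOf cs (s + 1)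

def picksB (cs : List Char) : List Int → List Int
  | [] => []
  | [_] => []
  | a :: b :: r =>
    (if PySem.Chars.strip (PySem.Chars.slice cs (some (a + 1)) (some b)) = [] ∧
        b + 1 < (cs.length : Int)
     then [b + 1] else []) ++ picksB cs (b :: r)

lemma foldA (n L : Int) :
    ∀ (ls : List (List Char)) (i cp : Int) (P : List Int),
      ((PySem.List.enumerate ls i).foldl
        (fun (st : List Int × Int) (p : Int × List Char) =>
          (if 0 < p.1 ∧ PySem.Chars.strip p.2 = [] ∧ p.1 < n - 1 then
             (if st.2 + (p.2.length : Int) + 1 < L then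
                st.1 ++ [st.2 + (p.2.length : Int) + 1]
              else st.1)
           else st.1,
           st.2 + (p.2.length : Int) + 1)) (P, cp)).1
      = P ++ picksA n L ls i cp := by
  intro ls
  induction ls with
  | nil => intro i cp P; simp [PySem.List.enumerate, picksA]
  | cons l ls ih =>
    intro i cp P
    rw [PySem.List.enumerate_cons, List.foldl_cons]
    rw [ih]
    simp only [picksA]
    split_ifs with h1 h2 h3 <;> simp_all <;> omega

lemma picksA_cons (n L : Int) (l : List Char) (ls : List (List Char)) (i cp : Int) :
    picksA n L (l :: ls) i cp
      = (if 0 < i ∧ PySem.Chars.strip l = [] ∧ i < n - 1 ∧ cp + (l.length : Int) + 1 < L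
         then [cp + (l.length : Int) + 1] else []) ++ picksA n L ls (i + 1) (cp + (l.length : Int) + 1) := rfl

lemma picksA_eq_picksA' (n L : Int) :
    ∀ (ls : List (List Char)) (i cp : Int), 1 ≤ i → i + (ls.length : Int) = n →
      picksA n L ls i cp = picksA' L ls cp := by
  intro ls
  induction ls with
  | nil => intro i cp _ _; simp [picksA, picksA']
  | cons l t ih =>
    intro i cp h1 h2
    cases t with
    | nil =>
      simp only [picksA, picksA']
      rw [if_neg (by simp at h2; omega)]
      simp [picksA]
    | cons l' r =>
      rw [picksA_cons, ih (i + 1) _ (by omega) (by simp at h2 ⊢; omega)]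
      simp only [picksA']
      congr 1
      have hi : 0 < i ∧ i < n - 1 := by simp at h2; omega
      by_cases hs : PySem.Chars.strip l = [] ∧ cp + (l.length : Int) + 1 < L
      · rw [if_pos ⟨hi.1, hs.1, hi.2, hs.2⟩, if_pos hs]
      · rw [if_neg (by tauto), if_neg hs]

lemma foldB (cs : List Char) (L : Int) (hL : L = (cs.length : Int)) :
    ∀ (nl : List Int) (P : List Int),
      ((nl.zip nl.tail).foldl
        (fun positions ab =>
          if PySem.Chars.strip (PySem.Chars.slice cs (some (ab.1 + 1)) (some ab.2)) = [] ∧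
             ab.2 + 1 < L then
            positions ++ [ab.2 + 1]
          else positions) P)
      = P ++ picksB cs nl := by
  intro nl
  induction nl with
  | nil => intro P; simp [picksB]
  | cons a t ih =>
    intro P
    cases t with
    | nil => simp [picksB]
    | cons b r =>
      simp only [List.tail_cons, List.zip_cons_cons, List.foldl_cons]
      rw [show (b :: r).zip r = (b :: r).zip (b :: r).tail from rfl, ih]
      simp only [picksB, hL]
      split_ifs <;> simp

lemma nlOf_eq_enum (cs : List Char) :
    ∀ (s : Int),
      ((PySem.List.enumerate cs s).filter (fun p => p.2 == '\n')).map (fun p => p.1)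
        = nlOf cs s := by
  induction cs with
  | nil => intro s; simp [PySem.List.enumerate, nlOf]
  | cons c t ih =>
    intro s
    rw [PySem.List.enumerate_cons]
    by_cases hc : c = '\n'
    · subst hc; simp [nlOf, List.filter_cons, ih]
    · simp [nlOf, List.filter_cons, hc, ih]

lemma nlOf_free (l : List Char) (hf : freeNl l) : ∀ s, nlOf l s = [] := by
  induction l with
  | nil => intro s; simp [nlOf]
  | cons c t ih =>
    intro s
    simp only [freeNl, List.mem_cons] at hf
    have hc : ¬ c = '\n' := fun h => hf (Or.inl h.symm)
    simp only [nlOf, if_neg hc]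
    exact ih (by simp only [freeNl]; intro h; exact hf (Or.inr h)) _

lemma nlOf_append_free (l : List Char) (hf : freeNl l) :
    ∀ (cs : List Char) (s : Int), nlOf (l ++ cs) s = nlOf cs (s + (l.length : Int)) := by
  induction l with
  | nil => intro cs s; simp
  | cons c t ih =>
    intro cs s
    simp only [freeNl, List.mem_cons] at hf
    have hc : ¬ c = '\n' := fun h => hf (Or.inl h.symm)
    simp only [List.cons_append, nlOf, if_neg hc]
    rw [ih (by simp only [freeNl]; intro h; exact hf (Or.inr h)) cs (s + 1)]
    congr 1
    simp only [List.length_cons]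
    push_cast
    ring

lemma crux (cs : List Char) :
    ∀ (ls : List (List Char)) (l pre : List Char),
      freeNl l → (∀ x ∈ ls, freeNl x) → cs = pre ++ joinNl (l :: ls) →
      picksB cs (nlOf (joinNl (l :: ls)) (pre.length : Int))
        = picksA' ((cs.length : Int)) ls ((pre.length : Int) + (l.length : Int) + 1) := by
  intro ls
  induction ls with
  | nil =>
    intro l pre hl _ hcs
    simp only [joinNl]
    rw [nlOf_free l hl]
    simp [picksB, picksA']
  | cons l1 rest ih =>
    intro l pre hl hls hcs
    have hl1 : freeNl l1 := hls l1 (List.mem_cons_self ..)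
    have hrest : ∀ x ∈ rest, freeNl x := fun x hx => hls x (List.mem_cons_of_mem _ hx)
    have hjoin : joinNl (l :: l1 :: rest) = l ++ '\n' :: joinNl (l1 :: rest) := rfl
    rw [hjoin, nlOf_append_free l hl]
    simp only [nlOf, reduceIte]
    cases rest with
    | nil =>
      simp only [joinNl]
      rw [nlOf_free l1 hl1]
      simp [picksB, picksA']
    | cons r0 r' =>
      have hjoin1 : joinNl (l1 :: r0 :: r') = l1 ++ '\n' :: joinNl (r0 :: r') := rfl
      rw [hjoin1, nlOf_append_free l1 hl1]
      simp only [nlOf, reduceIte]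
      -- the newline-index list is a :: b :: tail
      have hb : ∀ (tail : List Int),
          picksB cs (((pre.length : Int) + (l.length : Int)) ::
            ((pre.length : Int) + (l.length : Int) + 1 + (l1.length : Int)) :: tail)
          = (if PySem.Chars.strip (PySem.Chars.slice cs
                (some ((pre.length : Int) + (l.length : Int) + 1))
                (some ((pre.length : Int) + (l.length : Int) + 1 + (l1.length : Int)))) = [] ∧
               (pre.length : Int) + (l.length : Int) + 1 + (l1.length : Int) + 1 < (cs.length : Int)
             then [(pre.length : Int) + (l.length : Int) + 1 + (l1.length : Int) + 1] else []) ++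
            picksB cs ((((pre.length : Int) + (l.length : Int) + 1 + (l1.length : Int))) :: tail) := by
        intro tail; rfl
      have hslice : PySem.Chars.slice cs
            (some ((pre.length : Int) + (l.length : Int) + 1))
            (some ((pre.length : Int) + (l.length : Int) + 1 + (l1.length : Int))) = l1 := by
        rw [PySem.Chars.slice_eq_listSlice]
        have h1 : (pre.length : Int) + (l.length : Int) + 1 = ((pre.length + l.length + 1 : Nat) : Int) := by push_cast; ring
        rw [h1, PySem.List.slice_natCast_add]
        rw [hcs, hjoin]
        rw [show pre ++ (l ++ '\n' :: joinNl (l1 :: r0 :: r')) = (pre ++ l ++ ['\n']) ++ joinNl (l1 :: r0 :: r') by simp]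
        rw [List.drop_left' (by simp only [List.length_append, List.length_cons, List.length_nil]), hjoin1]
        exact List.take_left ..
      rw [hb, hslice]
      have hcs' : cs = (pre ++ l ++ ['\n']) ++ joinNl (l1 :: r0 :: r') := by
        rw [hcs, hjoin]; simp
      have ihx := ih l1 (pre ++ l ++ ['\n']) hl1 hrest hcs'
      rw [hjoin1, nlOf_append_free l1 hl1] at ihx
      simp only [nlOf, reduceIte] at ihx
      have hlen : (((pre ++ l ++ ['\n']).length : Nat) : Int) = (pre.length : Int) + (l.length : Int) + 1 := by
        simp only [List.length_append, List.length_cons, List.length_nil]; push_cast; ring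
      rw [hlen] at ihx
      have hA : picksA' ((cs.length : Int)) (l1 :: r0 :: r') ((pre.length : Int) + (l.length : Int) + 1)
          = (if PySem.Chars.strip l1 = [] ∧ (pre.length : Int) + (l.length : Int) + 1 + (l1.length : Int) + 1 < (cs.length : Int)
             then [(pre.length : Int) + (l.length : Int) + 1 + (l1.length : Int) + 1] else [])
            ++ picksA' ((cs.length : Int)) (r0 :: r') ((pre.length : Int) + (l.length : Int) + 1 + (l1.length : Int) + 1) := rfl
      rw [hA, ← ihx]

theorem main_eq (text : String) :
    calculate_paragraph_positions_py text = calculate_paragraph_positions_py_alt text := by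
  obtain ⟨l0, ls, hsplit⟩ : ∃ l0 ls, splitNl text.toList = l0 :: ls := by
    cases h : splitNl text.toList with
    | nil => exact absurd h (splitNl_ne_nil _)
    | cons a t => exact ⟨a, t, rfl⟩
  have hfree := freeNl_splitNl text.toList
  rw [hsplit] at hfree
  have hj : joinNl (l0 :: ls) = text.toList := by rw [← hsplit]; exact joinNl_splitNl _
  -- A side
  have hA : calculate_paragraph_positions_py text
      = [0] ++ picksA (((PySem.Chars.splitOn text.toList ['\n']).length : Int))
          ((text.toList.length : Int)) (PySem.Chars.splitOn text.toList ['\n']) 0 0 :=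
    foldA _ _ _ 0 0 [0]
  rw [splitOn_eq_splitNl, hsplit] at hA
  rw [picksA_cons] at hA
  rw [if_neg (by simp)] at hA
  rw [List.nil_append, show (0:Int) + 1 = 1 from rfl] at hA
  rw [picksA_eq_picksA' _ _ ls 1 _ (by omega) (by simp; omega)] at hA
  -- B side
  have hB : calculate_paragraph_positions_py_alt text
      = [0] ++ picksB text.toList
          (((PySem.List.enumerate text.toList 0).filter (fun p => p.2 == '\n')).map (fun p => p.1)) :=
    foldB _ _ rfl _ [0]
  rw [nlOf_eq_enum] at hB
  have hcrux := crux text.toList ls l0 [] (hfree l0 (List.mem_cons_self ..))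
      (fun x hx => hfree x (List.mem_cons_of_mem _ hx)) (by rw [hj]; rfl)
  rw [hj] at hcrux
  simp only [List.length_nil, Nat.cast_zero] at hcrux
  rw [hA, hB, hcrux]

-- ===== VERDICT (by name: the statement is the Claim_ definition above) =====
theorem calculate_paragraph_positions_py_spec : Claim_equal_calculate_paragraph_positions_py := by
  intro text _
  unfold Spec_calculate_paragraph_positions_py
  exact main_eq text
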